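-- pv_equiv track=rewrite | github.com/Pengppi/algorithm-practice | leetcode/src/main/python/leetcode/editor/cn/预算内的最多机器人数目maximumNumberOfRobotsWithinBudget.py | maximumRobots
-- ===== SOURCE A (Python) =====
-- from typing import List
--
-- def maximumRobots(chargeTimes: List[int], runningCosts: List[int], budget: int) -> int:
--     n = len(chargeTimes)
--     st = []
--     s = 0
--     l = 0
--     ans = 0
--     for r in range(n):
--         while st and chargeTimes[st[-1]] <= chargeTimes[r]:
--             del st[-1]
--         st.append(r)
--         s += runningCosts[r]
--         while l <= r and chargeTimes[st[0]] + (r - l + 1) * s > budget: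
--             s -= runningCosts[l]
--             if l in st:
--                 st.remove(l)
--             l += 1
--         ans = max(ans, r - l + 1)
--     return ans
-- ===== SOURCE B (Python) =====
-- from typing import List
--
-- def maximumRobots(chargeTimes: List[int], runningCosts: List[int], budget: int) -> int:
--     n = len(chargeTimes)
--     # prefix sums of runningCosts: window sum = pre[r+1] - pre[l]
--     pre = [0]
--     for w in runningCosts:
--         pre.append(pre[-1] + w)
--     # sparse table for range-max over chargeTimes: table[j][i] = max of 2**j entries from i
--     table = [chargeTimes[:]]
--     j = 1
--     while (1 << j) <= n:
--         prev = table[-1]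
--         half = 1 << (j - 1)
--         table.append([max(prev[i], prev[i + half]) for i in range(len(prev) - half)])
--         j += 1
--
--     def wmax(l, r):  # max of chargeTimes[l..r] in O(1)
--         k = (r - l + 1).bit_length() - 1
--         row = table[k]
--         return max(row[l], row[r + 1 - (1 << k)])
--
--     ans = 0
--     l = 0
--     for r in range(n):
--         while l <= r and wmax(l, r) + (r - l + 1) * (pre[r + 1] - pre[l]) > budget:
--             l += 1
--         ans = max(ans, r - l + 1)
--     return ans
-- ===== Notes on version B (the rewrite author's own statement) =====
-- stated objective: alternative
-- what changed: B drops A's online monotonic stack (with its linear 'l in st'/st.remove scans) entirely: it precomputes prefix sums and a sparse table of range maxima and runs the two-pointer scan with O(1) window-max and window-sum queries.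
import Mathlib
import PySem

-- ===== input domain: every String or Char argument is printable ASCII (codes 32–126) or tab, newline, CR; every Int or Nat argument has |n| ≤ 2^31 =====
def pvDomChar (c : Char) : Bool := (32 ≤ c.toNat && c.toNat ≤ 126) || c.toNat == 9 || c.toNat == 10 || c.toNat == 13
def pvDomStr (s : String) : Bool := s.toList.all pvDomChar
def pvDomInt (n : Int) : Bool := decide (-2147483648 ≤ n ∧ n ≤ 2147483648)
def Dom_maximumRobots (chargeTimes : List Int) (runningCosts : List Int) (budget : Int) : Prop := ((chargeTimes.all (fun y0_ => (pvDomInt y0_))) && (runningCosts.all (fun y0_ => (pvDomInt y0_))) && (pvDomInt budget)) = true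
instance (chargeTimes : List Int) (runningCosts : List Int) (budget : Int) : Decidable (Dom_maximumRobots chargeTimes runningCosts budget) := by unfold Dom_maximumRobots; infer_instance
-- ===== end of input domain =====

-- B drops A's online monotonic stack: it precomputes prefix sums and a sparse table for
-- range maxima and runs the two-pointer scan with O(1) window-max queries (objective: alternative).

-- ===== PORT A =====
-- A's Python list `st` is kept with its MOST RECENT element at the head (Python st[-1] = head,
-- st[0] = getLastD); chargeTimes[..]/runningCosts[..] are pyGetD, exact because every index
-- used is provably in range on Pre_ (st holds indices < len(chargeTimes), l ≤ r < n ≤ len rc).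
def popA (ct : List Int) (c : Int) : List Int → List Int
  | [] => []
  | x :: xs => if PySem.List.pyGetD ct x 0 ≤ c then popA ct c xs else x :: xs

def innerA (ct rc : List Int) (budget r : Int) (ts : List Int) (s l : Int) : List Int × Int × Int :=
  if h : l ≤ r ∧ budget < PySem.List.pyGetD ct (ts.getLastD 0) 0 + (r - l + 1) * s then
    innerA ct rc budget r (if l ∈ ts then ts.erase l else ts) (s - PySem.List.pyGetD rc l 0) (l + 1)
  else (ts, s, l)
termination_by (r + 1 - l).toNat
decreasing_by omega

def stepA (ct rc : List Int) (budget : Int) (st : List Int × Int × Int × Int) (r : Int) :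
    List Int × Int × Int × Int :=
  let ts := r :: popA ct (PySem.List.pyGetD ct r 0) st.1
  let res := innerA ct rc budget r ts (st.2.1 + PySem.List.pyGetD rc r 0) st.2.2.1
  (res.1, res.2.1, res.2.2, max st.2.2.2 (r - res.2.2 + 1))

def maximumRobots (chargeTimes : List Int) (runningCosts : List Int) (budget : Int) : Int :=
  ((PySem.List.pyRange 0 (chargeTimes.length : Int) 1).foldl
    (stepA chargeTimes runningCosts budget) ([], 0, 0, 0)).2.2.2

-- ===== PORT B =====
-- Source B: prefix sums `pre`, a sparse table `table` (row j holds the maxima of all blocks of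
-- 2^j consecutive chargeTimes), then the two-pointer scan querying the window max in O(1).
-- Python's m.bit_length() - 1 for m ≥ 1 is exactly Nat.log2 m; the while-loop that appends
-- rows for j = 1 .. max{j | 2^j ≤ n} is transcribed as the same rows indexed by
-- List.range (Nat.log2 n + 1) (for n = 0 both build the single row [chargeTimes]).
def prefB : Int → List Int → List Int
  | s, [] => [s]
  | s, x :: xs => s :: prefB (s + x) xs

def nextRowB (prev : List Int) (half : Nat) : List Int :=
  (List.range (prev.length - half)).map (fun i => max (prev.getD i 0) (prev.getD (i + half) 0))

def rowB (ct : List Int) : Nat → List Int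
  | 0 => ct
  | j + 1 => nextRowB (rowB ct j) (2 ^ j)

def tableB (ct : List Int) : List (List Int) :=
  (List.range (Nat.log2 ct.length + 1)).map (rowB ct)

def wmaxB (tbl : List (List Int)) (l r : Int) : Int :=
  let k := Nat.log2 (r - l + 1).toNat
  let row := tbl.getD k []
  max (PySem.List.pyGetD row l 0) (PySem.List.pyGetD row (r + 1 - 2 ^ k) 0)

def shrinkB (pre : List Int) (tbl : List (List Int)) (budget r : Int) (l : Int) : Int :=
  if h : l ≤ r ∧ budget < wmaxB tbl l r
      + (r - l + 1) * (PySem.List.pyGetD pre (r + 1) 0 - PySem.List.pyGetD pre l 0) then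
    shrinkB pre tbl budget r (l + 1)
  else l
termination_by (r + 1 - l).toNat
decreasing_by omega

def stepBalt (pre : List Int) (tbl : List (List Int)) (budget : Int) (st : Int × Int) (r : Int) :
    Int × Int :=
  let l := shrinkB pre tbl budget r st.1
  (l, max st.2 (r - l + 1))

def maximumRobots_alt (chargeTimes : List Int) (runningCosts : List Int) (budget : Int) : Int :=
  ((PySem.List.pyRange 0 (chargeTimes.length : Int) 1).foldl
    (stepBalt (prefB 0 runningCosts) (tableB chargeTimes) budget) (0, 0)).2

-- ===== PRECONDITION & SPEC =====
-- Pre_ excludes exactly the inputs where A raises IndexError: runningCosts shorter than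
-- chargeTimes (the loop reads runningCosts[r] for every r < len(chargeTimes)).
def Pre_maximumRobots (chargeTimes : List Int) (runningCosts : List Int) (budget : Int) : Prop :=
  chargeTimes.length ≤ runningCosts.length
instance (chargeTimes : List Int) (runningCosts : List Int) (budget : Int) : Decidable (Pre_maximumRobots chargeTimes runningCosts budget) := by unfold Pre_maximumRobots; infer_instance

def pvWitness_maximumRobots : List Int × List Int × Int := ([3, 6, 1, 3, 4], [2, 1, 3, 4, 5], 25)

def Spec_maximumRobots (chargeTimes : List Int) (runningCosts : List Int) (budget : Int) (out : Int) : Prop := out = maximumRobots_alt chargeTimes runningCosts budget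
instance (chargeTimes : List Int) (runningCosts : List Int) (budget : Int) (out : Int) : Decidable (Spec_maximumRobots chargeTimes runningCosts budget out) := by unfold Spec_maximumRobots; infer_instance

-- ===== CLAIM (what is proved, stated in full; the proofs are below) =====
def Claim_equal_maximumRobots : Prop := ∀ (chargeTimes : List Int) (runningCosts : List Int) (budget : Int), Dom_maximumRobots chargeTimes runningCosts budget → Pre_maximumRobots chargeTimes runningCosts budget → Spec_maximumRobots chargeTimes runningCosts budget (maximumRobots chargeTimes runningCosts budget)

-- ===== LEMMAS AND PROOFS =====

-- maximum of the m+1 entries ct[i], …, ct[i+m] (the common specification both sides meet)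
def specMax (ct : List Int) : Nat → Nat → Int
  | i, 0 => ct.getD i 0
  | i, m + 1 => max (ct.getD i 0) (specMax ct (i + 1) m)

theorem specMax_ge (ct : List Int) : ∀ (m i t : Nat), i ≤ t → t ≤ i + m →
    ct.getD t 0 ≤ specMax ct i m := by
  intro m
  induction m with
  | zero =>
    intro i t h1 h2
    have ht : t = i := by omega
    subst ht
    simp only [specMax]
    exact le_rfl
  | succ m ih =>
    intro i t h1 h2
    simp only [specMax]
    rcases eq_or_lt_of_le h1 with h | h
    · subst h; exact le_max_left _ _
    · exact le_trans (ih (i + 1) t (by omega) (by omega)) (le_max_right _ _)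

theorem specMax_attained (ct : List Int) : ∀ (m i : Nat),
    ∃ t, i ≤ t ∧ t ≤ i + m ∧ specMax ct i m = ct.getD t 0 := by
  intro m
  induction m with
  | zero => intro i; exact ⟨i, le_rfl, by omega, rfl⟩
  | succ m ih =>
    intro i
    rcases max_choice (ct.getD i 0) (specMax ct (i + 1) m) with h | h
    · exact ⟨i, le_rfl, by omega, by simp only [specMax]; exact h⟩
    · obtain ⟨t, h1, h2, h3⟩ := ih (i + 1)
      exact ⟨t, by omega, by omega, by simp only [specMax]; rw [h, h3]⟩

theorem specMax_char (ct : List Int) (v : Int) (i m : Nat)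
    (hw : ∃ t, i ≤ t ∧ t ≤ i + m ∧ v = ct.getD t 0)
    (hb : ∀ t, i ≤ t → t ≤ i + m → ct.getD t 0 ≤ v) : v = specMax ct i m := by
  obtain ⟨t, h1, h2, h3⟩ := hw
  obtain ⟨t', h1', h2', h3'⟩ := specMax_attained ct m i
  have hle : v ≤ specMax ct i m := h3 ▸ specMax_ge ct m i t h1 h2
  have hge : specMax ct i m ≤ v := h3' ▸ hb t' h1' h2'
  omega

theorem rowB_length (ct : List Int) : ∀ j : Nat, 2 ^ j ≤ ct.length →
    (rowB ct j).length + 2 ^ j = ct.length + 1 := by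
  intro j
  induction j with
  | zero => intro _; simp [rowB]
  | succ j ih =>
    intro h
    have h2 : (2 : Nat) ^ (j + 1) = 2 ^ j + 2 ^ j := by ring
    have hj : 2 ^ j ≤ ct.length := by omega
    have := ih hj
    simp only [rowB, nextRowB, List.length_map, List.length_range]
    omega

theorem rowB_getD (ct : List Int) : ∀ (j i : Nat), i + 2 ^ j ≤ ct.length →
    (rowB ct j).getD i 0 = specMax ct i (2 ^ j - 1) := by
  intro j
  induction j with
  | zero => intro i h; simp [rowB, specMax]
  | succ j ih =>
    intro i h
    have h2 : (2 : Nat) ^ (j + 1) = 2 ^ j + 2 ^ j := by ring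
    have hp : (1 : Nat) ≤ 2 ^ j := Nat.one_le_two_pow
    have hlen := rowB_length ct j (by omega)
    have hi : i < (rowB ct j).length - 2 ^ j := by omega
    simp only [rowB, nextRowB]
    rw [PySem.List.getD_map_range _ _ _ _ hi]
    rw [ih i (by omega), ih (i + 2 ^ j) (by omega)]
    apply specMax_char
    · rcases max_choice (specMax ct i (2 ^ j - 1)) (specMax ct (i + 2 ^ j) (2 ^ j - 1)) with hm | hm
      · obtain ⟨t, h1, h2', h3⟩ := specMax_attained ct (2 ^ j - 1) i
        exact ⟨t, h1, by omega, by rw [hm, h3]⟩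
      · obtain ⟨t, h1, h2', h3⟩ := specMax_attained ct (2 ^ j - 1) (i + 2 ^ j)
        exact ⟨t, by omega, by omega, by rw [hm, h3]⟩
    · intro t h1 h2'
      by_cases ht : t ≤ i + (2 ^ j - 1)
      · exact le_trans (specMax_ge ct (2 ^ j - 1) i t h1 ht) (le_max_left _ _)
      · exact le_trans (specMax_ge ct (2 ^ j - 1) (i + 2 ^ j) t (by omega) (by omega))
          (le_max_right _ _)

theorem wmaxB_eq (ct : List Int) (ln rn : Nat) (h1 : ln ≤ rn) (h2 : rn < ct.length) :
    wmaxB (tableB ct) (ln : Int) (rn : Int) = specMax ct ln (rn - ln) := by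
  have hL : ((rn : Int) - (ln : Int) + 1).toNat = rn - ln + 1 := by omega
  set k := Nat.log2 (rn - ln + 1) with hk
  have hLne : rn - ln + 1 ≠ 0 := by omega
  have hlow : 2 ^ k ≤ rn - ln + 1 := Nat.log2_self_le hLne
  have hhigh : rn - ln + 1 < 2 ^ (k + 1) := Nat.lt_log2_self
  have h2k : (2 : Nat) ^ (k + 1) = 2 ^ k + 2 ^ k := by ring
  have hkn : k < Nat.log2 ct.length + 1 := by
    have : Nat.log2 (rn - ln + 1) < Nat.log2 ct.length + 1 := by
      rw [Nat.log2_lt hLne]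
      calc rn - ln + 1 ≤ ct.length := by omega
        _ < 2 ^ (Nat.log2 ct.length + 1) := Nat.lt_log2_self
    omega
  have htbl : (tableB ct).getD k [] = rowB ct k := by
    unfold tableB
    exact PySem.List.getD_map_range _ _ _ _ hkn
  have hi2 : ((rn : Int) + 1 - 2 ^ k) = ((rn + 1 - 2 ^ k : Nat) : Int) := by
    have : (2:Int) ^ k = ((2 ^ k : Nat) : Int) := by push_cast; ring
    rw [this]; omega
  unfold wmaxB
  simp only [← hk, hL]
  rw [htbl, hi2, PySem.List.pyGetD_natCast, PySem.List.pyGetD_natCast]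
  rw [rowB_getD ct k ln (by omega), rowB_getD ct k (rn + 1 - 2 ^ k) (by omega)]
  apply specMax_char
  · rcases max_choice (specMax ct ln (2 ^ k - 1)) (specMax ct (rn + 1 - 2 ^ k) (2 ^ k - 1))
      with hm | hm
    · obtain ⟨t, ha, hb, hc⟩ := specMax_attained ct (2 ^ k - 1) ln
      exact ⟨t, ha, by omega, by rw [hm, hc]⟩
    · obtain ⟨t, ha, hb, hc⟩ := specMax_attained ct (2 ^ k - 1) (rn + 1 - 2 ^ k)
      exact ⟨t, by omega, by omega, by rw [hm, hc]⟩
  · intro t ha hb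
    by_cases ht : t ≤ ln + (2 ^ k - 1)
    · exact le_trans (specMax_ge ct (2 ^ k - 1) ln t ha ht) (le_max_left _ _)
    · exact le_trans (specMax_ge ct (2 ^ k - 1) (rn + 1 - 2 ^ k) t (by omega) (by omega))
        (le_max_right _ _)

theorem prefB_getD : ∀ (rc : List Int) (s : Int) (i : Nat), i ≤ rc.length →
    (prefB s rc).getD i 0 = s + (rc.take i).sum := by
  intro rc
  induction rc with
  | nil =>
    intro s i h
    have : i = 0 := by simpa using h
    subst this; simp [prefB]
  | cons x xs ih =>
    intro s i h
    cases i with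
    | zero => simp [prefB]
    | succ i =>
      have := ih (s + x) i (by simpa using h)
      simp only [prefB, List.getD_cons_succ, this, List.take_succ_cons, List.sum_cons]
      ring

-- pyGetD into the prefix-sum list, for a nonnegative in-range Int index
theorem preB_pyGetD (rc : List Int) (i : Int) (h0 : 0 ≤ i) (h1 : i ≤ (rc.length : Int)) :
    PySem.List.pyGetD (prefB 0 rc) i 0 = (rc.take i.toNat).sum := by
  have h : i = ((i.toNat : Nat) : Int) := by omega
  conv_lhs => rw [h]
  rw [PySem.List.pyGetD_natCast, prefB_getD rc 0 i.toNat (by omega)]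
  simp

theorem popA_suffix (ct : List Int) (c : Int) : ∀ ts : List Int, popA ct c ts <:+ ts := by
  intro ts
  induction ts with
  | nil => exact List.suffix_rfl
  | cons x xs ih =>
    simp only [popA]
    split
    · exact ih.trans (List.suffix_cons x xs)
    · exact List.suffix_rfl

theorem lastD_mem : ∀ (ts : List Int), ts ≠ [] → ts.getLastD 0 ∈ ts := by
  intro ts h
  induction ts with
  | nil => exact absurd rfl h
  | cons x xs ih =>
    cases xs with
    | nil => simp
    | cons y ys => simpa using Or.inr (ih (by simp))

-- the oldest stack entry carries the largest charge (charges strictly increase toward the tail)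
theorem lastD_charge_max (ct : List Int) : ∀ ts : List Int,
    List.Pairwise (fun a b : Int => PySem.List.pyGetD ct a 0 < PySem.List.pyGetD ct b 0) ts →
    ∀ x ∈ ts, PySem.List.pyGetD ct x 0 ≤ PySem.List.pyGetD ct (ts.getLastD 0) 0 := by
  intro ts
  induction ts with
  | nil => intro _ x hx; simp at hx
  | cons a xs ih =>
    intro hp x hx
    cases xs with
    | nil => simp at hx; subst hx; simp
    | cons y ys =>
      have hlast : ((a :: y :: ys).getLastD 0) = ((y :: ys).getLastD 0) := by
        simp [List.getLastD_eq_getLast?, List.getLast?_eq_some_getLast]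
      rw [List.mem_cons] at hx
      rw [hlast]
      rcases hx with hx | hx
      · subst hx
        have hmem : (y :: ys).getLastD 0 ∈ y :: ys := lastD_mem _ (by simp)
        exact le_of_lt ((List.pairwise_cons.mp hp).1 _ hmem)
      · exact ih (List.pairwise_cons.mp hp).2 x hx

theorem popA_gt (ct : List Int) (c : Int) : ∀ ts : List Int,
    List.Pairwise (fun a b : Int => PySem.List.pyGetD ct a 0 < PySem.List.pyGetD ct b 0) ts →
    ∀ x ∈ popA ct c ts, c < PySem.List.pyGetD ct x 0 := by
  intro ts
  induction ts with
  | nil => intro _ x hx; simp [popA] at hx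
  | cons y ys ih =>
    intro hp x hx
    simp only [popA] at hx
    split at hx
    · exact ih (List.pairwise_cons.mp hp).2 x hx
    · next hy =>
      rw [List.mem_cons] at hx
      rcases hx with hx | hx
      · subst hx; omega
      · have := (List.pairwise_cons.mp hp).1 x hx
        omega

theorem popA_dropped (ct : List Int) (c : Int) : ∀ ts : List Int,
    ∀ x ∈ ts, x ∉ popA ct c ts → PySem.List.pyGetD ct x 0 ≤ c := by
  intro ts
  induction ts with
  | nil => intro x hx; simp at hx
  | cons y ys ih =>
    intro x hx hnx
    simp only [popA] at hnx
    split at hnx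
    · next hy =>
      rw [List.mem_cons] at hx
      rcases hx with hx | hx
      · subst hx; exact hy
      · exact ih x hx hnx
    · exact absurd hx hnx

-- the stack front (Python st[0]) is the window maximum: ct[st.getLastD] = B's RMQ answer
theorem stack_wmax (ct : List Int) (r l : Int) (hrn : r < (ct.length : Int))
    (hl0 : 0 ≤ l) (hlr : l ≤ r) (ts : List Int)
    (hpc : List.Pairwise (fun a b : Int => PySem.List.pyGetD ct a 0 < PySem.List.pyGetD ct b 0) ts)
    (hb : ∀ x ∈ ts, l ≤ x ∧ x ≤ r)
    (hdom : ∀ i : Int, l ≤ i → i ≤ r →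
      ∃ t ∈ ts, i ≤ t ∧ PySem.List.pyGetD ct i 0 ≤ PySem.List.pyGetD ct t 0) :
    PySem.List.pyGetD ct (ts.getLastD 0) 0 = wmaxB (tableB ct) l r := by
  have hcl : l = ((l.toNat : Nat) : Int) := by omega
  have hcr : r = ((r.toNat : Nat) : Int) := by omega
  have hwm : wmaxB (tableB ct) l r = specMax ct l.toNat (r.toNat - l.toNat) := by
    rw [hcl, hcr]
    exact wmaxB_eq ct l.toNat r.toNat (by omega) (by omega)
  rw [hwm]
  obtain ⟨t0, ht0, _, _⟩ := hdom r hlr le_rfl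
  have hne : ts ≠ [] := List.ne_nil_of_mem ht0
  have hg := lastD_mem ts hne
  have hgb := hb _ hg
  apply specMax_char
  · refine ⟨(ts.getLastD 0).toNat, by omega, by omega, ?_⟩
    have hcast : ts.getLastD 0 = (((ts.getLastD 0).toNat : Nat) : Int) := by omega
    conv_lhs => rw [hcast]
    rw [PySem.List.pyGetD_natCast]
  · intro t ha hbnd
    obtain ⟨tw, htw, hle, hch⟩ := hdom (t : Int) (by omega) (by omega)
    have h1 : ct.getD t 0 = PySem.List.pyGetD ct (t : Int) 0 := by
      rw [PySem.List.pyGetD_natCast]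
    rw [h1]
    exact le_trans hch (lastD_charge_max ct ts hpc tw htw)

-- the inner shrink loops agree step for step, and A's loop preserves the stack invariants
theorem inner_eq (ct rc : List Int) (budget : Int) (hlen : ct.length ≤ rc.length)
    (r : Int) (hr0 : 0 ≤ r) (hrn : r < (ct.length : Int)) :
    ∀ (fuel : Nat) (ts : List Int) (s l : Int),
      List.Pairwise (fun a b : Int => b < a) ts →
      List.Pairwise (fun a b : Int => PySem.List.pyGetD ct a 0 < PySem.List.pyGetD ct b 0) ts →
      (∀ x ∈ ts, l ≤ x ∧ x ≤ r) →
      (∀ i : Int, l ≤ i → i ≤ r →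
        ∃ t ∈ ts, i ≤ t ∧ PySem.List.pyGetD ct i 0 ≤ PySem.List.pyGetD ct t 0) →
      0 ≤ l → l ≤ r + 1 →
      s = (rc.take (r + 1).toNat).sum - (rc.take l.toNat).sum →
      (r + 1 - l).toNat < fuel →
      (innerA ct rc budget r ts s l).2.2 = shrinkB (prefB 0 rc) (tableB ct) budget r l ∧
      (List.Pairwise (fun a b : Int => b < a) (innerA ct rc budget r ts s l).1 ∧
       List.Pairwise (fun a b : Int => PySem.List.pyGetD ct a 0 < PySem.List.pyGetD ct b 0)
         (innerA ct rc budget r ts s l).1 ∧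
       (∀ x ∈ (innerA ct rc budget r ts s l).1,
          (innerA ct rc budget r ts s l).2.2 ≤ x ∧ x ≤ r) ∧
       (∀ i : Int, (innerA ct rc budget r ts s l).2.2 ≤ i → i ≤ r →
          ∃ t ∈ (innerA ct rc budget r ts s l).1, i ≤ t ∧
            PySem.List.pyGetD ct i 0 ≤ PySem.List.pyGetD ct t 0) ∧
       l ≤ (innerA ct rc budget r ts s l).2.2 ∧ (innerA ct rc budget r ts s l).2.2 ≤ r + 1 ∧
       (innerA ct rc budget r ts s l).2.1 =
         (rc.take (r + 1).toNat).sum - (rc.take (innerA ct rc budget r ts s l).2.2.toNat).sum) := by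
  intro fuel
  induction fuel with
  | zero => intro ts s l _ _ _ _ _ _ _ hf; omega
  | succ fuel ih =>
    intro ts s l hp hpc hb hdom hl0 hl1 hs hf
    by_cases hlr : l ≤ r
    · have hwx := stack_wmax ct r l hrn hl0 hlr ts hpc hb hdom
      have hpr1 : PySem.List.pyGetD (prefB 0 rc) (r + 1) 0 = (rc.take (r + 1).toNat).sum :=
        preB_pyGetD rc (r + 1) (by omega) (by omega)
      have hprl : PySem.List.pyGetD (prefB 0 rc) l 0 = (rc.take l.toNat).sum :=
        preB_pyGetD rc l (by omega) (by omega)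
      by_cases hcnum : budget < PySem.List.pyGetD ct (ts.getLastD 0) 0 + (r - l + 1) * s
      · have hc : l ≤ r ∧ budget < PySem.List.pyGetD ct (ts.getLastD 0) 0 + (r - l + 1) * s :=
          ⟨hlr, hcnum⟩
        have hcB : l ≤ r ∧ budget < wmaxB (tableB ct) l r + (r - l + 1) *
            (PySem.List.pyGetD (prefB 0 rc) (r + 1) 0 - PySem.List.pyGetD (prefB 0 rc) l 0) := by
          refine ⟨hlr, ?_⟩
          rw [hpr1, hprl, ← hs, ← hwx]
          exact hcnum
        rw [innerA, dif_pos hc, shrinkB, dif_pos hcB]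
        set E := if l ∈ ts then ts.erase l else ts with hE
        have hsubE : E.Sublist ts := by
          rw [hE]; split
          · exact List.erase_sublist
          · exact List.Sublist.refl ts
        have hnd : ts.Nodup := hp.imp (fun h => by omega)
        have hnotl : l ∉ E := by
          rw [hE]; split
          · next hmem => intro hx; exact ((List.Nodup.mem_erase_iff hnd).mp hx).1 rfl
          · next hmem => exact hmem
        have hmemE : ∀ x ∈ ts, x ≠ l → x ∈ E := by
          intro x hx hne
          rw [hE]; split
          · exact (List.mem_erase_of_ne hne).mpr hx
          · exact hx
        have hb' : ∀ x ∈ E, l + 1 ≤ x ∧ x ≤ r := by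
          intro x hx
          have hxts := hsubE.mem hx
          have := hb x hxts
          have hxne : x ≠ l := fun h => hnotl (h ▸ hx)
          constructor
          · rcases lt_or_eq_of_le this.1 with h | h
            · omega
            · exact absurd h.symm hxne
          · exact this.2
        have hdom' : ∀ i : Int, l + 1 ≤ i → i ≤ r →
            ∃ t ∈ E, i ≤ t ∧ PySem.List.pyGetD ct i 0 ≤ PySem.List.pyGetD ct t 0 := by
          intro i h1 h2
          obtain ⟨t, ht, hle, hch⟩ := hdom i (by omega) h2
          exact ⟨t, hmemE t ht (by omega), hle, hch⟩
        have hrcl : PySem.List.pyGetD rc l 0 = rc.getD l.toNat 0 := by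
          have h2 : l = ((l.toNat : Nat) : Int) := by omega
          conv_lhs => rw [h2]
          rw [PySem.List.pyGetD_natCast]
        have hltlen : l.toNat < rc.length := by omega
        have hs' : s - PySem.List.pyGetD rc l 0 =
            (rc.take (r + 1).toNat).sum - (rc.take (l + 1).toNat).sum := by
          have hsucc : (l + 1).toNat = l.toNat + 1 := by omega
          rw [hsucc, List.sum_take_succ rc l.toNat hltlen, hrcl,
            List.getD_eq_getElem rc 0 hltlen, hs]
          ring
        obtain ⟨e1, e2, e3, e4, e5, e6, e7, e8⟩ :=
          ih E (s - PySem.List.pyGetD rc l 0) (l + 1) (hp.sublist hsubE)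
            (hpc.sublist hsubE) hb' hdom' (by omega) (by omega) hs' (by omega)
        exact ⟨e1, e2, e3, e4, e5, by omega, e7, e8⟩
      · have hc : ¬ (l ≤ r ∧ budget < PySem.List.pyGetD ct (ts.getLastD 0) 0 + (r - l + 1) * s) :=
          fun h => hcnum h.2
        have hcB : ¬ (l ≤ r ∧ budget < wmaxB (tableB ct) l r + (r - l + 1) *
            (PySem.List.pyGetD (prefB 0 rc) (r + 1) 0 - PySem.List.pyGetD (prefB 0 rc) l 0)) := by
          intro h
          apply hcnum
          have h2 := h.2
          rw [hpr1, hprl] at h2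
          rw [hwx, hs]
          exact h2
        rw [innerA, dif_neg hc, shrinkB, dif_neg hcB]
        exact ⟨rfl, hp, hpc, hb, hdom, le_rfl, hl1, hs⟩
    · have hc : ¬ (l ≤ r ∧ budget < PySem.List.pyGetD ct (ts.getLastD 0) 0 + (r - l + 1) * s) :=
        fun h => hlr h.1
      have hcB : ¬ (l ≤ r ∧ budget < wmaxB (tableB ct) l r + (r - l + 1) *
          (PySem.List.pyGetD (prefB 0 rc) (r + 1) 0 - PySem.List.pyGetD (prefB 0 rc) l 0)) :=
        fun h => hlr h.1
      rw [innerA, dif_neg hc, shrinkB, dif_neg hcB]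
      exact ⟨rfl, hp, hpc, hb, hdom, le_rfl, hl1, hs⟩

theorem fold_eq (ct rc : List Int) (budget : Int) (hlen : ct.length ≤ rc.length) :
    ∀ (m k : Nat), ct.length - k = m → k ≤ ct.length →
    ∀ (ts : List Int) (s l ans : Int),
      List.Pairwise (fun a b : Int => b < a) ts →
      List.Pairwise (fun a b : Int => PySem.List.pyGetD ct a 0 < PySem.List.pyGetD ct b 0) ts →
      (∀ x ∈ ts, l ≤ x ∧ x + 1 ≤ (k : Int)) →
      (∀ i : Int, l ≤ i → i + 1 ≤ (k : Int) →
        ∃ t ∈ ts, i ≤ t ∧ PySem.List.pyGetD ct i 0 ≤ PySem.List.pyGetD ct t 0) →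
      0 ≤ l → l ≤ (k : Int) →
      s = (rc.take k).sum - (rc.take l.toNat).sum →
      ((PySem.List.pyRange (k : Int) (ct.length : Int) 1).foldl
          (stepA ct rc budget) (ts, s, l, ans)).2.2.2 =
        ((PySem.List.pyRange (k : Int) (ct.length : Int) 1).foldl
          (stepBalt (prefB 0 rc) (tableB ct) budget) (l, ans)).2 := by
  intro m
  induction m with
  | zero =>
    intro k hm hk ts s l ans _ _ _ _ _ _ _
    have hkn : k = ct.length := by omega
    subst hkn
    rw [PySem.List.pyRange_one_eq_nil le_rfl]
    simp
  | succ m ihm =>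
    intro k hm hk ts s l ans hp hpc hb hdom hl0 hl hs
    have hkn : k < ct.length := by omega
    rw [PySem.List.pyRange_one_cons (show (k : Int) < (ct.length : Int) by exact_mod_cast hkn)]
    simp only [List.foldl_cons]
    simp only [stepA, stepBalt]
    set c := PySem.List.pyGetD ct (k : Int) 0 with hc
    set ts1 := (k : Int) :: popA ct c ts with hts1
    -- invariants of the freshly pushed stack, for the window [l, k]
    have hsufp := popA_suffix ct c ts
    have hsubp : (popA ct c ts).Sublist ts := hsufp.sublist
    have hp1 : List.Pairwise (fun a b : Int => b < a) ts1 := by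
      rw [hts1]
      refine List.pairwise_cons.mpr ⟨fun x hx => ?_, hp.sublist hsubp⟩
      have := hb x (hsubp.mem hx)
      omega
    have hpc1 : List.Pairwise
        (fun a b : Int => PySem.List.pyGetD ct a 0 < PySem.List.pyGetD ct b 0) ts1 := by
      rw [hts1]
      exact List.pairwise_cons.mpr ⟨popA_gt ct c ts hpc, hpc.sublist hsubp⟩
    have hb1 : ∀ x ∈ ts1, l ≤ x ∧ x ≤ (k : Int) := by
      intro x hx
      rw [hts1, List.mem_cons] at hx
      rcases hx with hx | hx
      · subst hx; exact ⟨hl, le_rfl⟩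
      · have := hb x (hsubp.mem hx)
        omega
    have hdom1 : ∀ i : Int, l ≤ i → i ≤ (k : Int) →
        ∃ t ∈ ts1, i ≤ t ∧ PySem.List.pyGetD ct i 0 ≤ PySem.List.pyGetD ct t 0 := by
      intro i h1 h2
      rcases eq_or_lt_of_le h2 with h | h
      · exact ⟨(k : Int), by rw [hts1]; exact List.mem_cons_self, by omega, by rw [h]⟩
      · obtain ⟨t, ht, hle, hch⟩ := hdom i h1 (by omega)
        by_cases htp : t ∈ popA ct c ts
        · exact ⟨t, by rw [hts1]; exact List.mem_cons_of_mem _ htp, hle, hch⟩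
        · have hdrop := popA_dropped ct c ts t ht htp
          exact ⟨(k : Int), by rw [hts1]; exact List.mem_cons_self, by omega, by omega⟩
    have hrck : PySem.List.pyGetD rc (k : Int) 0 = rc.getD k 0 := PySem.List.pyGetD_natCast ..
    have hklen : k < rc.length := by omega
    have hs1 : s + PySem.List.pyGetD rc (k : Int) 0 =
        (rc.take ((k : Int) + 1).toNat).sum - (rc.take l.toNat).sum := by
      have h1 : ((k : Int) + 1).toNat = k + 1 := by omega
      rw [h1, List.sum_take_succ rc k hklen, hrck, List.getD_eq_getElem rc 0 hklen, hs]
      ring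
    obtain ⟨heq, hpA, hpcA, hbA, hdomA, hlA, hl1A, hsA⟩ :=
      inner_eq ct rc budget hlen (k : Int) (by omega)
        (by exact_mod_cast hkn) (((k : Int) + 1 - l).toNat + 1) ts1
        (s + PySem.List.pyGetD rc (k : Int) 0) l hp1 hpc1 hb1 hdom1 hl0 (by omega) hs1 (by omega)
    set res := innerA ct rc budget (k : Int) ts1 (s + PySem.List.pyGetD rc (k : Int) 0) l with hres
    have hcast : ((k : Int) + 1) = (((k + 1 : Nat)) : Int) := by push_cast; ring
    have hscast : ((k : Int) + 1).toNat = k + 1 := by omega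
    rw [hscast] at hsA
    rw [← heq]
    rw [hcast]
    exact ihm (k + 1) (by omega) (by omega) res.1 res.2.1 res.2.2
      (max ans ((k : Int) - res.2.2 + 1))
      hpA hpcA
      (fun x hx => ⟨(hbA x hx).1, by have := (hbA x hx).2; push_cast; omega⟩)
      (fun i h1 h2 => hdomA i h1 (by push_cast at h2 ⊢; omega))
      (by omega) (by push_cast; omega)
      hsA

-- ===== VERDICT (by name: the statement is the Claim_ definition above) =====
theorem maximumRobots_spec : Claim_equal_maximumRobots := by
  intro ct rc budget _hdom hpre
  unfold Spec_maximumRobots maximumRobots maximumRobots_alt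
  have h := fold_eq ct rc budget hpre (ct.length) 0 (by omega) (by omega)
      [] 0 0 0 (by simp) (by simp) (by simp) (by intro i h1 h2; omega)
      (by omega) (by simp) (by simp)
  simpa using h
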